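-- pv_equiv track=rewrite | github.com/Akonitopz/Learning-python | exercise56.py | uplowcheck
-- ===== SOURCE A (Python) =====
-- def uplowcheck(string):
--     upper = []
--     lower = []
--     for i in string:
--         if i.islower() == True:
--             lower.append(i)
--         else:
--             upper.append(i)
--
--     ans = ''.join(lower + upper)
--
--     return ans
-- ===== SOURCE B (Python) =====
-- def uplowcheck(string):
--     return ''.join(sorted(string, key=lambda c: not c.islower()))
-- ===== Notes on version B (the rewrite author's own statement) =====
-- stated objective: simpler
-- what changed: Replaces the explicit two-bucket accumulation loop with a single stable sort keyed on not-islower, which puts lowercase characters first while preserving relative order.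
import Mathlib
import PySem

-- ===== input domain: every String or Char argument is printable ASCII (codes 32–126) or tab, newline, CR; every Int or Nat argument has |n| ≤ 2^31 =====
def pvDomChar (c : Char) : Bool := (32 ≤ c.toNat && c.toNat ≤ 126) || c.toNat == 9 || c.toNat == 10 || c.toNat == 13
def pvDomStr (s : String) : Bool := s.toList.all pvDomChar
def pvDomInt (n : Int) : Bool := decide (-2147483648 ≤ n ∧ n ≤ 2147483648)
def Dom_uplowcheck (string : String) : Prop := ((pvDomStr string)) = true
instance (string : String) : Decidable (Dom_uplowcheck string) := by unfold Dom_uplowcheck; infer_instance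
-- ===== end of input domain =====

-- B replaces A's two-bucket accumulation loop with one stable sort keyed on not-islower (simpler, one expression).

-- ===== PORT A =====
-- state (upper, lower); for each char, append to lower if islower, else to upper; return join(lower + upper)
def uplowcheck (string : String) : String :=
  let p := string.toList.foldl
    (fun (acc : List Char × List Char) i =>
      if PySem.Chars.islower i == true then (acc.1, acc.2 ++ [i]) else (acc.1 ++ [i], acc.2))
    ([], [])
  String.ofList (p.2 ++ p.1)

-- ===== PORT B =====
-- the key `not c.islower()` is a Python bool, compared as the int 0/1 by sorted
def uplowcheck_alt (string : String) : String :=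
  String.ofList (PySem.List.sorted string.toList
    (fun c => if PySem.Chars.islower c then (0 : Int) else 1) false)

-- ===== PRECONDITION & SPEC =====
def Spec_uplowcheck (string : String) (out : String) : Prop := out = uplowcheck_alt string
instance (string : String) (out : String) : Decidable (Spec_uplowcheck string out) := by unfold Spec_uplowcheck; infer_instance

-- ===== CLAIM (what is proved, stated in full; the proofs are below) =====
def Claim_equal_uplowcheck : Prop := ∀ (string : String), Dom_uplowcheck string → Spec_uplowcheck string (uplowcheck string)

-- ===== LEMMAS AND PROOFS =====

-- the sort key used by B's port
def pvKey (c : Char) : Int := if PySem.Chars.islower c then 0 else 1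

-- inserting into a partitioned list keeps the partition: lowers before, others after
theorem pv_insert_part (c : Char) (L U : List Char)
    (hL : ∀ x ∈ L, PySem.Chars.islower x = true)
    (hU : ∀ x ∈ U, PySem.Chars.islower x = false) :
    PySem.List.insertBy (fun a b => decide (pvKey a < pvKey b)) c (L ++ U) =
      if PySem.Chars.islower c then L ++ c :: U else (L ++ U) ++ [c] := by
  induction L with
  | nil =>
    simp only [List.nil_append]
    induction U with
    | nil => simp [PySem.List.insertBy]
    | cons u us ih =>
      have hu := hU u (by simp)
      have hus : ∀ x ∈ us, PySem.Chars.islower x = false := fun x hx => hU x (by simp [hx])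
      by_cases hc : PySem.Chars.islower c = true
      · have hd : decide (pvKey c < pvKey u) = true := by simp [pvKey, hc, hu]
        simp [PySem.List.insertBy, hd, hc]
      · simp only [Bool.not_eq_true] at hc
        have hd : decide (pvKey c < pvKey u) = false := by simp [pvKey, hc, hu]
        simp [PySem.List.insertBy, hd, hc, ih hus]
  | cons l ls ih =>
    have hl := hL l (by simp)
    have hls : ∀ x ∈ ls, PySem.Chars.islower x = true := fun x hx => hL x (by simp [hx])
    have hd : decide (pvKey c < pvKey l) = false := by simp [pvKey, hl]; split <;> simp
    by_cases hc : PySem.Chars.islower c = true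
    · simp [PySem.List.insertBy, hd, hc, ih hls]
    · simp only [Bool.not_eq_true] at hc
      simp [PySem.List.insertBy, hd, hc, ih hls]

-- the insertion-sort fold over a partitioned accumulator is filter-lower ++ filter-other
theorem pv_sort_fold (cs : List Char) (L U : List Char)
    (hL : ∀ x ∈ L, PySem.Chars.islower x = true)
    (hU : ∀ x ∈ U, PySem.Chars.islower x = false) :
    cs.foldl (fun acc x => PySem.List.insertBy (fun a b => decide (pvKey a < pvKey b)) x acc) (L ++ U) =
      (L ++ cs.filter (fun c => PySem.Chars.islower c)) ++
        (U ++ cs.filter (fun c => !PySem.Chars.islower c)) := by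
  induction cs generalizing L U with
  | nil => simp
  | cons c cs ih =>
    simp only [List.foldl_cons]
    by_cases hc : PySem.Chars.islower c = true
    · have hstep : PySem.List.insertBy (fun a b => decide (pvKey a < pvKey b)) c (L ++ U) = (L ++ [c]) ++ U := by
        rw [pv_insert_part c L U hL hU]; simp [hc]
      have hL' : ∀ x ∈ L ++ [c], PySem.Chars.islower x = true := by
        intro x hx
        rcases List.mem_append.1 hx with h | h
        · exact hL x h
        · simp at h; simpa [h] using hc
      rw [hstep, ih (L ++ [c]) U hL' hU]
      simp [hc]
    · simp only [Bool.not_eq_true] at hc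
      have hstep : PySem.List.insertBy (fun a b => decide (pvKey a < pvKey b)) c (L ++ U) = L ++ (U ++ [c]) := by
        rw [pv_insert_part c L U hL hU]; simp [hc]
      have hU' : ∀ x ∈ U ++ [c], PySem.Chars.islower x = false := by
        intro x hx
        rcases List.mem_append.1 hx with h | h
        · exact hU x h
        · simp at h; simpa [h] using hc
      rw [hstep, ih L (U ++ [c]) hL hU']
      simp [hc]

-- A's two-bucket fold computes (filter-other, filter-lower)
theorem pv_a_fold (cs : List Char) (u l : List Char) :
    cs.foldl
      (fun (acc : List Char × List Char) i =>
        if PySem.Chars.islower i == true then (acc.1, acc.2 ++ [i]) else (acc.1 ++ [i], acc.2))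
      (u, l) =
      (u ++ cs.filter (fun c => !PySem.Chars.islower c), l ++ cs.filter (fun c => PySem.Chars.islower c)) := by
  induction cs generalizing u l with
  | nil => simp
  | cons c cs ih =>
    simp only [List.foldl_cons]
    by_cases hc : PySem.Chars.islower c = true
    · have hstep : (if PySem.Chars.islower c == true then ((u, l).1, (u, l).2 ++ [c]) else ((u, l).1 ++ [c], (u, l).2)) = (u, l ++ [c]) := by
        simp [hc]
      rw [hstep, ih]
      simp [hc]
    · simp only [Bool.not_eq_true] at hc
      have hstep : (if PySem.Chars.islower c == true then ((u, l).1, (u, l).2 ++ [c]) else ((u, l).1 ++ [c], (u, l).2)) = (u ++ [c], l) := by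
        simp [hc]
      rw [hstep, ih]
      simp [hc]

-- ===== VERDICT (by name: the statement is the Claim_ definition above) =====
theorem uplowcheck_spec : Claim_equal_uplowcheck := by
  intro s _
  show uplowcheck s = uplowcheck_alt s
  unfold uplowcheck uplowcheck_alt
  rw [PySem.List.sorted_eq_foldl_insertBy]
  have hb : (s.toList.foldl
      (fun acc x => PySem.List.insertBy
        (fun a b => decide ((if PySem.Chars.islower a then (0:Int) else 1) < (if PySem.Chars.islower b then (0:Int) else 1))) x acc) []) =
      s.toList.filter (fun c => PySem.Chars.islower c) ++ s.toList.filter (fun c => !PySem.Chars.islower c) := by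
    have := pv_sort_fold s.toList [] [] (by simp) (by simp)
    simpa [pvKey] using this
  rw [hb, pv_a_fold s.toList [] []]
  simp
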